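-- pv_equiv track=rewrite | github.com/cea-trust-platform/EOS_code | Modules/EOS/Src/EOS_Refprop9/Refprop9/Refprop9_patch.py | UpperLine
-- ===== SOURCE A (Python) =====
-- def UpperLine(lIn):
--     if lIn[0] in 'Cc!':
--         return ''
--     inString = False
--     lOut = ''
--     for c in lIn:
--         if c == "'":
--             inString = not inString
--         if inString:
--             lOut += c
--         else:
--             if c == '!':
--                 lOut += '\n'
--                 break
--             lOut += c.upper()
--     return lOut
-- ===== SOURCE B (Python) =====
-- def UpperLine(lIn):
--     if lIn[0] in "Cc!":
--         return ''
--     parts = []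
--     for i, seg in enumerate(lIn.split("'")):
--         if i > 0:
--             parts.append("'")
--         if i % 2 == 0:
--             j = seg.find('!')
--             if j >= 0:
--                 parts.append(seg[:j].upper() + '\n')
--                 break
--             parts.append(seg.upper())
--         else:
--             parts.append(seg)
--     return ''.join(parts)
-- ===== Notes on version B (the rewrite author's own statement) =====
-- stated objective: alternative
-- what changed: Replaces A's per-character state machine (inString flag toggled on each quote) by splitting the line on the quote character and processing segments by index parity: even segments are uppercased and scanned for the '!' comment marker via partition, odd segments are copied verbatim, with the separating quote re-inserted between segments.
import Mathlib
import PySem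

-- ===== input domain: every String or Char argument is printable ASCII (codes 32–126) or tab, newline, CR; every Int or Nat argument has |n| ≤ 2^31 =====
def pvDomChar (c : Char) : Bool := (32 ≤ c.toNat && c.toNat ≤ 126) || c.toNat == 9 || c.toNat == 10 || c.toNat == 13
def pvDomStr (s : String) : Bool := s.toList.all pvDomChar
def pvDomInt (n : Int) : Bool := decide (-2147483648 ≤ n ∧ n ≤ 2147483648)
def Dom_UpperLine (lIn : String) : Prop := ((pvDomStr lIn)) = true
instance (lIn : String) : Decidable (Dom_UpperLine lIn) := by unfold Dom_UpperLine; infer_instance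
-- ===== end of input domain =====

-- B rewrites A's per-character state machine as a split on "'" with parity deciding in/out of string (objective: alternative decomposition, same cost).

-- ===== PORT A =====
-- A's for-loop over the characters with the inString flag and the break on '!'
def upperA : List Char → Bool → List Char
  | [], _ => []
  | c :: rest, inS =>
    let inS' := if c = '\'' then !inS else inS
    if inS' then c :: upperA rest inS'
    else if c = '!' then ['\n']          -- lOut += '\n'; break
    else PySem.Chars.upperChar c :: upperA rest inS'

def UpperLine (lIn : String) : String :=
  match PySem.List.pyGet? lIn.toList 0 with    -- lIn[0]; none = IndexError, excluded by Pre_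
  | none => ""
  | some c0 =>
    if PySem.Chars.isIn [c0] ['C', 'c', '!'] then ""   -- lIn[0] in 'Cc!'
    else String.ofList (upperA lIn.toList false)

-- ===== PORT B =====
-- hand port of seg.partition('!') for the one-character separator '!' (str.partition is not in PySem); exact:
-- returns (text before the first '!', whether '!' occurs, text after it)
def partitionBang : List Char → List Char × Bool × List Char
  | [] => ([], false, [])
  | c :: t =>
    if c = '!' then ([], true, t)
    else
      let r := partitionBang t
      (c :: r.1, r.2.1, r.2.2)

-- B's loop over the segments of lIn.split("'"): `inside` is the parity i % 2 == 1,
-- `first` tells whether to re-insert the separating "'" (i > 0)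
def procB : List (List Char) → Bool → Bool → List Char
  | [], _, _ => []
  | s :: rest, inside, first =>
    let pre : List Char := if first then [] else ['\'']
    if inside then pre ++ s ++ procB rest (!inside) false
    else
      match partitionBang s with
      | (head, true, _) => pre ++ PySem.Chars.upper head ++ ['\n']   -- comment found: break
      | (head, false, _) => pre ++ PySem.Chars.upper head ++ procB rest (!inside) false

def UpperLine_alt (lIn : String) : String :=
  match PySem.List.pyGet? lIn.toList 0 with    -- lIn[0]; none = IndexError, excluded by Pre_
  | none => ""
  | some c0 =>
    if PySem.Chars.isIn [c0] ['C', 'c', '!'] then ""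
    else String.ofList (procB (lIn.toList.splitOn '\'') false true)

-- ===== PRECONDITION & SPEC =====
-- Pre_ excludes only the empty string, on which A (and B) raise IndexError at lIn[0]
def Pre_UpperLine (lIn : String) : Prop := lIn ≠ ""
instance (lIn : String) : Decidable (Pre_UpperLine lIn) := by unfold Pre_UpperLine; infer_instance
def pvWitness_UpperLine : String := "read (x) ! comment"

def Spec_UpperLine (lIn : String) (out : String) : Prop := out = UpperLine_alt lIn
instance (lIn : String) (out : String) : Decidable (Spec_UpperLine lIn out) := by unfold Spec_UpperLine; infer_instance

-- ===== CLAIM (what is proved, stated in full; the proofs are below) =====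
def Claim_equal_UpperLine : Prop := ∀ (lIn : String), Dom_UpperLine lIn → Pre_UpperLine lIn → Spec_UpperLine lIn (UpperLine lIn)

-- ===== LEMMAS AND PROOFS =====

-- a leading "'" is emitted before any non-first, non-empty segment list, whatever its content
lemma procB_first_false (segs : List (List Char)) (h : segs ≠ []) (b : Bool) :
    procB segs b false = '\'' :: procB segs b true := by
  cases segs with
  | nil => exact absurd rfl h
  | cons s rest =>
    cases b <;> simp only [procB] <;>
      rcases hp : partitionBang s with ⟨hd, f, r⟩ <;> cases f <;> simp

-- the heart of the equivalence: A's state machine equals B's segment processing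
lemma upperA_eq_procB (l : List Char) : ∀ inS : Bool,
    upperA l inS = procB (l.splitOn '\'') inS true := by
  induction l with
  | nil =>
    intro inS
    cases inS <;> simp [upperA, List.splitOn, List.splitOnP_nil, procB, partitionBang,
      PySem.Chars.upper]
  | cons c l ih =>
    intro inS
    by_cases hq : c = '\''
    · subst hq
      have hsplit : ('\'' :: l).splitOn '\'' = [] :: l.splitOn '\'' := by
        simp [List.splitOn, List.splitOnP_cons]
      rw [hsplit]
      have hne : l.splitOn '\'' ≠ [] := List.splitOnP_ne_nil _ _
      have hrest : procB ([] :: l.splitOn '\'') inS true = procB (l.splitOn '\'') (!inS) false := by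
        cases inS <;> simp [procB, partitionBang, PySem.Chars.upper]
      rw [hrest, procB_first_false _ hne]
      have hup : PySem.Chars.upperChar '\'' = '\'' := by decide
      cases inS <;> simp [upperA, ih, hup]
    · -- c is neither a quote; splitOn prepends c to the first segment
      obtain ⟨s, rest, hsr⟩ : ∃ s rest, l.splitOn '\'' = s :: rest := by
        cases h : l.splitOn '\'' with
        | nil => exact absurd h (List.splitOnP_ne_nil _ _)
        | cons s rest => exact ⟨s, rest, rfl⟩
      have hsr' : l.splitOnP (· == '\'') = s :: rest := hsr
      have hsplit : (c :: l).splitOn '\'' = (c :: s) :: rest := by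
        show (c :: l).splitOnP (· == '\'') = _
        rw [List.splitOnP_cons, if_neg (by simp [hq]), hsr']
        rfl
      rw [hsplit]
      cases inS with
      | true =>
        have ihl := ih true; rw [hsr] at ihl
        simp only [procB, Bool.not_true] at ihl
        simp [upperA, hq, procB, ihl]
      | false =>
        by_cases hb : c = '!'
        · subst hb
          simp [upperA, hq, procB, partitionBang, PySem.Chars.upper]
        · rcases hp : partitionBang s with ⟨hd, f, r⟩
          have hpc : partitionBang (c :: s) = (c :: hd, f, r) := by
            simp [partitionBang, hb, hp]
          have ihl := ih false; rw [hsr] at ihl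
          simp only [procB, Bool.not_false, hp] at ihl
          cases f with
          | true =>
            simp only [upperA, if_neg hq, Bool.not_false, if_neg hb, procB, hpc]
            simp [ihl, PySem.Chars.upper]
          | false =>
            simp only [upperA, if_neg hq, Bool.not_false, if_neg hb, procB, hpc]
            simp [ihl, PySem.Chars.upper]

-- ===== VERDICT (by name: the statement is the Claim_ definition above) =====
theorem UpperLine_spec : Claim_equal_UpperLine := by
  intro lIn _ _
  unfold Spec_UpperLine UpperLine UpperLine_alt
  cases h : PySem.List.pyGet? lIn.toList 0 with
  | none => rfl
  | some c0 =>
    simp only []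
    split
    · rfl
    · exact congrArg String.ofList (upperA_eq_procB lIn.toList false)
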